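-- pv_equiv track=rewrite | github.com/hr1juldey/dspy-compounding-engineering | utils/knowledge/extractor.py | _group_findings_by_agent
-- ===== SOURCE A (Python) =====
-- def _group_findings_by_agent(findings: list) -> dict[str, list]:
--     """Group findings by agent name."""
--     by_agent = {}
--     for finding in findings:
--         agent = finding.get("agent", "Unknown")
--         if agent not in by_agent:
--             by_agent[agent] = []
--         by_agent[agent].append(finding)
--     return by_agent
-- ===== SOURCE B (Python) =====
-- def _group_findings_by_agent(findings: list) -> dict[str, list]:
--     """Group findings by agent name: dedupe the agent keys in first-appearance
--     order, then build each bucket with one filter pass per key."""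
--     key = lambda f: f.get("agent", "Unknown")
--     return {k: [f for f in findings if key(f) == k] for k in dict.fromkeys(map(key, findings))}
-- ===== Notes on version B (the rewrite author's own statement) =====
-- stated objective: alternative
-- what changed: A accumulates buckets in one pass over a dict; B first dedupes the agent keys in first-appearance order and then builds each bucket by filtering the whole list per key (a comprehension, no mutable accumulator).
import Mathlib
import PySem

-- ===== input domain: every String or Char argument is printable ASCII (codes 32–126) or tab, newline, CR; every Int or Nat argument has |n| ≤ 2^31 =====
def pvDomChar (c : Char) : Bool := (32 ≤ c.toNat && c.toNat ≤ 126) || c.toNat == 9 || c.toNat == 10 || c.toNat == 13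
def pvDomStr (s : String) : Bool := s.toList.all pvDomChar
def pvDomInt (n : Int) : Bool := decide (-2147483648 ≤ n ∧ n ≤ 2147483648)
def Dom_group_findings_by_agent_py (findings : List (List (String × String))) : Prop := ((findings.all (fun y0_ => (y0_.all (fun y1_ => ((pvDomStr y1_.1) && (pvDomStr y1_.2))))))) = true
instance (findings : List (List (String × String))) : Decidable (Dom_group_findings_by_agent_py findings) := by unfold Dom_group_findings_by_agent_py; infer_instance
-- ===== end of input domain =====

-- B replaces A's single mutable-dict accumulation pass by a key-dedup pass followed by
-- one filter per distinct agent key (alternative decomposition, not claimed faster).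


-- shared helper: finding.get("agent", "Unknown")  (first-match lookup on the assoc list)
def pvAgentKey (f : List (String × String)) : String :=
  (PySem.Dict.mk f).getD "agent" "Unknown"

-- ===== PORT A =====
def group_findings_by_agent_py (findings : List (List (String × String))) : List (String × List (List (String × String))) :=
  let by_agent : PySem.Dict String (List (List (String × String))) :=
    findings.foldl (fun d finding =>
      let agent := pvAgentKey finding
      -- if agent not in by_agent: by_agent[agent] = []
      let d := if d.contains agent then d else d.insert agent []
      -- by_agent[agent].append(finding)
      d.modify agent [] (fun xs => xs ++ [finding])) PySem.Dict.empty
  by_agent.items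

-- ===== PORT B =====
def group_findings_by_agent_py_alt (findings : List (List (String × String))) : List (String × List (List (String × String))) :=
  (PySem.Set.ofList (findings.map pvAgentKey)).map
    (fun k => (k, findings.filter (fun f => pvAgentKey f == k)))

-- ===== PRECONDITION & SPEC =====
def Spec_group_findings_by_agent_py (findings : List (List (String × String))) (out : List (String × List (List (String × String)))) : Prop := out = group_findings_by_agent_py_alt findings
instance (findings : List (List (String × String))) (out : List (String × List (List (String × String)))) : Decidable (Spec_group_findings_by_agent_py findings out) := by unfold Spec_group_findings_by_agent_py; infer_instance

-- ===== CLAIM (what is proved, stated in full; the proofs are below) =====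
def Claim_equal_group_findings_by_agent_py : Prop := ∀ (findings : List (List (String × String))), Dom_group_findings_by_agent_py findings → Spec_group_findings_by_agent_py findings (group_findings_by_agent_py findings)

-- ===== LEMMAS AND PROOFS =====

-- A's "if missing, init to []; then append" step is exactly Dict.modify.
theorem pv_step_eq_modify {ν : Type} (d : PySem.Dict String (List ν)) (a : String) (f : ν) :
    (if d.contains a then d else d.insert a []).modify a [] (fun xs => xs ++ [f])
      = d.modify a [] (fun xs => xs ++ [f]) := by
  by_cases h : d.contains a
  · simp [h]
  · have h' : d.contains a = false := by simpa using h
    simp only [PySem.Dict.modify, h', Bool.false_eq_true, if_false]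
    rw [PySem.Dict.getD_insert_self, PySem.Dict.insert_insert_self,
      PySem.Dict.getD_of_not_contains d [] h']

theorem pv_fold_eq :
    ∀ (findings : List (List (String × String)))
      (d : PySem.Dict String (List (List (String × String)))),
      findings.foldl (fun d finding =>
          let agent := pvAgentKey finding
          let d := if d.contains agent then d else d.insert agent []
          d.modify agent [] (fun xs => xs ++ [finding])) d
        = findings.foldl (fun d finding =>
            d.modify (pvAgentKey finding) [] (fun xs => xs ++ [finding])) d := by
  intro findings
  induction findings with
  | nil => intro d; rfl
  | cons f fs ih => intro d; simp only [List.foldl_cons, pv_step_eq_modify]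

-- ===== VERDICT (by name: the statement is the Claim_ definition above) =====
theorem group_findings_by_agent_py_spec : Claim_equal_group_findings_by_agent_py := by
  intro findings _
  unfold Spec_group_findings_by_agent_py group_findings_by_agent_py group_findings_by_agent_py_alt
  rw [pv_fold_eq]
  have hnd : (findings.foldl (fun d finding =>
      d.modify (pvAgentKey finding) [] (fun xs => xs ++ [finding])) PySem.Dict.empty).keys.Nodup :=
    PySem.Dict.nodup_keys_foldl_modify_key findings pvAgentKey []
      (fun _ x xs => xs ++ [x]) PySem.Dict.empty (by simp [PySem.Dict.keys_empty])
  rw [PySem.Dict.items_eq_map_keys _ hnd []]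
  rw [PySem.Dict.keys_foldl_modify_key findings pvAgentKey [] (fun _ x xs => xs ++ [x])]
  simp only [PySem.Dict.keys_empty, PySem.Set.update_nil_left]
  apply List.map_congr_left
  intro k _
  have hfold : findings.foldl (fun d finding =>
        d.modify (pvAgentKey finding) [] (fun xs => xs ++ [finding])) PySem.Dict.empty
      = (findings.map (fun f => (pvAgentKey f, f))).foldl
          (fun d p => d.modify p.1 [] (fun xs => xs ++ [p.2])) PySem.Dict.empty := by
    rw [List.foldl_map]
  rw [hfold, PySem.Dict.getD_foldl_modify_append]
  simp [PySem.Dict.getD_empty, List.filter_map, Function.comp_def]
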